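-- pv_equiv track=rewrite | github.com/Jane11111/Leetcode2021 | M004.py | solve
-- ===== SOURCE A (Python) =====
-- def solve(matrix):
--     n = len(matrix)
--     count = 0
--
--     for sx in range(n):
--         for sy in range(n):
--
--
--             for ex in range(sx,n):
--                 for ey in range(sy,n):
--                     if matrix[ex][ey] == '#':
--                         break
--                     f = True
--                     for i in range(sx,ex+1):
--                         for j in range(sy,ey+1):
--                             if matrix[i][j] == '#':
--                                 f = False
--                                 break
--                         if not f:
--                             break
--                     if f:
--                         count+=1
--     return count
-- ===== SOURCE B (Python) =====
-- def solve(matrix):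
--     n = len(matrix)
--     # runs[i][j] = length of the run of non-'#' cells in row i starting at column j (within the first n columns)
--     runs = []
--     for row in matrix:
--         acc = [0]
--         j = n - 1
--         while j >= 0:
--             acc = [0 if row[j] == '#' else acc[0] + 1] + acc
--             j -= 1
--         runs.append(acc)
--     total = 0
--     for sy in range(n):
--         for sx in range(n):
--             w = n - sy
--             for ex in range(sx, n):
--                 rv = runs[ex][sy]
--                 if rv < w:
--                     w = rv
--                 total += w
--     return total
-- ===== Notes on version B (the rewrite author's own statement) =====
-- stated objective: faster
-- what changed: Replaces the O(n^6) enumerate-all-rectangles-and-rescan check by precomputing per-row runs of clear cells and, for each (top-left column, top row), sweeping the bottom row while maintaining the running minimum run width, which directly counts the clear rectangles.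
import Mathlib
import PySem

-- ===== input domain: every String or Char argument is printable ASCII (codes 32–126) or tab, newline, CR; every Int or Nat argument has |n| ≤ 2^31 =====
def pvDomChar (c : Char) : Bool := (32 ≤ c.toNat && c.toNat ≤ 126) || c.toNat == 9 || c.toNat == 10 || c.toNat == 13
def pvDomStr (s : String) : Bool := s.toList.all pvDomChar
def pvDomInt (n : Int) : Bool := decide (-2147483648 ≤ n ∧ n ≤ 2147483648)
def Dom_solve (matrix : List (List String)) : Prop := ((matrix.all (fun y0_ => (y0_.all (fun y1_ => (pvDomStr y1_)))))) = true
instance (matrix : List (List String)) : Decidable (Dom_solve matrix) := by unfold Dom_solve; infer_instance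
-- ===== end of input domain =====

-- B replaces A's re-scan of every candidate rectangle by per-row clear-run lengths and a
-- running minimum over bottom rows (measurably faster; equal return values on Pre_solve).

-- ===== PORT A =====
def pvCell (m : List (List String)) (i j : Int) : String :=
  PySem.List.pyGetD (PySem.List.pyGetD m i []) j ""

def aLoopJ (m : List (List String)) (i : Int) : List Int → Bool
  | [] => true
  | j :: rest => if pvCell m i j == "#" then false else aLoopJ m i rest

def aLoopI (m : List (List String)) (sy ey : Int) : List Int → Bool
  | [] => true
  | i :: rest => if aLoopJ m i (PySem.List.pyRange sy (ey + 1)) then aLoopI m sy ey rest else false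

def aLoopEy (m : List (List String)) (sx sy ex : Int) : List Int → Int → Int
  | [], c => c
  | ey :: rest, c =>
    if pvCell m ex ey == "#" then c
    else aLoopEy m sx sy ex rest (if aLoopI m sy ey (PySem.List.pyRange sx (ex + 1)) then c + 1 else c)

def solve (matrix : List (List String)) : Int :=
  let n : Int := matrix.length
  (PySem.List.pyRange 0 n).foldl (fun c sx =>
    (PySem.List.pyRange 0 n).foldl (fun c sy =>
      (PySem.List.pyRange sx n).foldl (fun c ex =>
        aLoopEy matrix sx sy ex (PySem.List.pyRange sy n) c) c) c) 0

-- ===== PORT B =====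
def bBuildAcc (row : List String) (j : Int) (acc : List Int) : List Int :=
  if h : 0 ≤ j then
    bBuildAcc row (j - 1)
      ((if PySem.List.pyGetD row j "" == "#" then 0 else PySem.List.pyGetD acc 0 0 + 1) :: acc)
  else acc
termination_by (j + 1).toNat
decreasing_by omega

def solve_alt (matrix : List (List String)) : Int :=
  let n : Int := matrix.length
  let runs : List (List Int) := matrix.map (fun row => bBuildAcc row (n - 1) [0])
  (PySem.List.pyRange 0 n).foldl (fun total sy =>
    (PySem.List.pyRange 0 n).foldl (fun total sx =>
      ((PySem.List.pyRange sx n).foldl (fun (st : Int × Int) ex =>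
          let rv := PySem.List.pyGetD (PySem.List.pyGetD runs ex []) sy 0
          let w := if rv < st.1 then rv else st.1
          (w, st.2 + w)) (n - sy, total)).2) total) 0

-- ===== PRECONDITION & SPEC =====
-- The Python A raises IndexError exactly when some row is shorter than len(matrix)
-- (it indexes matrix[i][j] for all i, j < len(matrix)); Pre_ excludes exactly those inputs.
def Pre_solve (matrix : List (List String)) : Prop :=
  ∀ row ∈ matrix, matrix.length ≤ row.length
instance (matrix : List (List String)) : Decidable (Pre_solve matrix) := by
  unfold Pre_solve; infer_instance

def pvWitness_solve : List (List String) := [["a", "b"], ["#", "c"]]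

def Spec_solve (matrix : List (List String)) (out : Int) : Prop := out = solve_alt matrix
instance (matrix : List (List String)) (out : Int) : Decidable (Spec_solve matrix out) := by
  unfold Spec_solve; infer_instance

-- ===== CLAIM (what is proved, stated in full; the proofs are below) =====
def Claim_equal_solve : Prop :=
  ∀ (matrix : List (List String)), Dom_solve matrix → Pre_solve matrix →
    Spec_solve matrix (solve matrix)

-- ===== LEMMAS AND PROOFS =====

-- run of consecutive non-'#' cells of `row` starting at column j (bounded by n)
def runR (row : List String) (n j : Nat) : Nat :=
  if j < n then (if PySem.List.pyGetD row (j : Int) "" == "#" then 0 else runR row n (j + 1) + 1)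
  else 0
termination_by n - j

def rr (m : List (List String)) (i sy : Nat) : Nat :=
  runR (PySem.List.pyGetD m (i : Int) []) m.length sy

def clearN (m : List (List String)) (sx sy ex ey : Nat) : Bool :=
  (List.range' sx (ex + 1 - sx)).all (fun i =>
    (List.range' sy (ey + 1 - sy)).all (fun j => !(pvCell m (i : Int) (j : Int) == "#")))

def mfold (m : List (List String)) (sy w : Nat) (l : List Nat) : Nat :=
  l.foldl (fun w i => min w (rr m i sy)) w

def T (r : Nat → Nat) (w k e : Nat) : Nat :=
  match k with
  | 0 => 0
  | Nat.succ k => min w (r e) + T r (min w (r e)) k (e + 1)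

def contrib (m : List (List String)) (sx sy : Nat) : Int :=
  (T (fun i => rr m i sy) (m.length - sy) (m.length - sx) sx : Nat)

def gEx (m : List (List String)) (sx sy : Nat) (exI : Int) : Int :=
  ((mfold m sy (m.length - sy) (List.range' sx (exI.toNat + 1 - sx)) : Nat) : Int)

def gSy (m : List (List String)) (sx : Nat) (syI : Int) : Int := contrib m sx syI.toNat

def gSx (m : List (List String)) (sxI : Int) : Int :=
  ((List.range m.length).map (fun sy => contrib m sxI.toNat sy)).sum

def gSyB (m : List (List String)) (syI : Int) : Int :=
  ((List.range m.length).map (fun sx => contrib m sx syI.toNat)).sum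

def gSxB (m : List (List String)) (sy : Nat) (sxI : Int) : Int := contrib m sxI.toNat sy

lemma pyRangeNat (k a : Nat) :
    PySem.List.pyRange (a : Int) ((a + k : Nat) : Int)
      = (List.range' a k).map (Nat.cast : Nat → Int) := by
  induction k generalizing a with
  | zero => simp [PySem.List.pyRange]
  | succ k ih =>
    rw [PySem.List.pyRange_one_cons (by push_cast; omega)]
    have h1 : (a : Int) + 1 = ((a + 1 : Nat) : Int) := by push_cast; ring
    have h2 : ((a + (k + 1) : Nat) : Int) = (((a + 1) + k : Nat) : Int) := by push_cast; ring
    rw [h2, h1, ih (a + 1), List.range'_succ]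
    simp

lemma pyRangeNat' (a b : Nat) (h : a ≤ b) :
    PySem.List.pyRange (a : Int) (b : Int) = (List.range' a (b - a)).map (Nat.cast : Nat → Int) := by
  have := pyRangeNat (b - a) a
  rwa [show a + (b - a) = b by omega] at this

lemma aLoopJ_eq (m : List (List String)) (i : Int) (js : List Int) :
    aLoopJ m i js = js.all (fun j => !(pvCell m i j == "#")) := by
  induction js with
  | nil => rfl
  | cons j rest ih => cases hc : pvCell m i j == "#" <;> simp [aLoopJ, hc, ih]

lemma aLoopI_eq (m : List (List String)) (sy ey : Int) (is_ : List Int) :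
    aLoopI m sy ey is_ = is_.all (fun i => aLoopJ m i (PySem.List.pyRange sy (ey + 1))) := by
  induction is_ with
  | nil => rfl
  | cons i rest ih =>
    cases hc : aLoopJ m i (PySem.List.pyRange sy (ey + 1)) <;> simp [aLoopI, hc, ih]

lemma clear_spec (m : List (List String)) (sx sy ex ey : Nat)
    (hsx : sx ≤ ex + 1) (hsy : sy ≤ ey + 1) :
    aLoopI m (sy : Int) (ey : Int) (PySem.List.pyRange (sx : Int) ((ex : Int) + 1))
      = clearN m sx sy ex ey := by
  rw [aLoopI_eq, Bool.eq_iff_iff]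
  unfold clearN
  simp only [List.all_eq_true, aLoopJ_eq]
  constructor
  · intro h i hi
    obtain ⟨hi1, hi2⟩ := List.mem_range'_1.mp hi
    have h2 := h (i : Int) (PySem.List.mem_pyRange_one.mpr ⟨by omega, by omega⟩)
    intro j hj
    obtain ⟨hj1, hj2⟩ := List.mem_range'_1.mp hj
    exact h2 (j : Int) (PySem.List.mem_pyRange_one.mpr ⟨by omega, by omega⟩)
  · intro h i hi
    obtain ⟨hi1, hi2⟩ := PySem.List.mem_pyRange_one.mp hi
    intro j hj
    obtain ⟨hj1, hj2⟩ := PySem.List.mem_pyRange_one.mp hj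
    obtain ⟨iN, rfl⟩ := Int.eq_ofNat_of_zero_le (by omega : (0 : Int) ≤ i)
    obtain ⟨jN, rfl⟩ := Int.eq_ofNat_of_zero_le (by omega : (0 : Int) ≤ j)
    exact h iN (List.mem_range'_1.mpr ⟨by omega, by omega⟩) jN
      (List.mem_range'_1.mpr ⟨by omega, by omega⟩)

lemma rowRun (m : List (List String)) (i : Nat) :
    ∀ (k sy : Nat), 0 < k → sy + k ≤ m.length →
      (List.range' sy k).all (fun j => !(pvCell m (i : Int) (j : Int) == "#"))
        = decide (k ≤ rr m i sy) := by
  intro k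
  induction k with
  | zero => intro sy h hn; exact absurd h (lt_irrefl 0)
  | succ k ih =>
    intro sy _ hn
    have hsy : sy < m.length := by omega
    have hrr : rr m i sy
        = if pvCell m (i : Int) (sy : Int) == "#" then 0 else rr m i (sy + 1) + 1 := by
      unfold rr pvCell
      rw [runR]
      rw [if_pos hsy]
    rw [List.range'_succ]
    cases hc : pvCell m (i : Int) (sy : Int) == "#" with
    | true => rw [hrr, hc]; simp [hc]
    | false =>
      cases k with
      | zero =>
        rw [hrr, hc]
        simp [hc]
      | succ k' =>
        rw [List.all_cons]
        rw [ih (sy + 1) (by omega) (by omega), hrr, hc]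
        simp only [Bool.not_false, Bool.true_and, if_neg Bool.false_ne_true]
        rw [decide_eq_decide.mpr
          (by omega : (k' + 1 ≤ rr m i (sy + 1)) ↔ (k' + 1 + 1 ≤ rr m i (sy + 1) + 1))]

lemma mfold_le (m : List (List String)) (sy : Nat) :
    ∀ (l : List Nat) (w : Nat), mfold m sy w l ≤ w := by
  intro l
  induction l with
  | nil => intro w; simp [mfold]
  | cons i rest ih =>
    intro w
    calc mfold m sy w (i :: rest) = mfold m sy (min w (rr m i sy)) rest := rfl
    _ ≤ min w (rr m i sy) := ih _
    _ ≤ w := Nat.min_le_left _ _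

lemma le_mfold_iff (m : List (List String)) (sy : Nat) :
    ∀ (l : List Nat) (w c : Nat),
      (c ≤ mfold m sy w l ↔ c ≤ w ∧ ∀ i ∈ l, c ≤ rr m i sy) := by
  intro l
  induction l with
  | nil => intro w c; simp [mfold]
  | cons i rest ih =>
    intro w c
    have h : mfold m sy w (i :: rest) = mfold m sy (min w (rr m i sy)) rest := rfl
    rw [h, ih, Nat.le_min]
    simp only [List.mem_cons, forall_eq_or_imp]
    tauto

lemma clear_iff (m : List (List String)) (sx sy ex ey : Nat)
    (_hsx : sx ≤ ex) (_hex : ex < m.length) (hsy : sy ≤ ey) (hey : ey < m.length) :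
    clearN m sx sy ex ey
      = decide (ey + 1 - sy ≤ mfold m sy (m.length - sy) (List.range' sx (ex + 1 - sx))) := by
  unfold clearN
  have hrow : ∀ i : Nat, (List.range' sy (ey + 1 - sy)).all
        (fun j => !(pvCell m (i : Int) (j : Int) == "#"))
      = decide (ey + 1 - sy ≤ rr m i sy) :=
    fun i => rowRun m i (ey + 1 - sy) sy (by omega) (by omega)
  simp only [hrow]
  rw [Bool.eq_iff_iff]
  simp only [List.all_eq_true, decide_eq_true_eq]
  rw [le_mfold_iff]
  constructor
  · intro h; exact ⟨by omega, h⟩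
  · rintro ⟨-, h⟩; exact h

lemma clear_false (m : List (List String)) (sx sy ex ey ey0 : Nat)
    (hsx : sx ≤ ex) (hsy : sy ≤ ey0) (hey : ey0 ≤ ey)
    (hc : pvCell m (ex : Int) (ey0 : Int) == "#") :
    clearN m sx sy ex ey = false := by
  unfold clearN
  rw [List.all_eq_false]
  have hmem2 : ey0 ∈ List.range' sy (ey + 1 - sy) := List.mem_range'_1.mpr ⟨hsy, by omega⟩
  refine ⟨ex, List.mem_range'_1.mpr ⟨hsx, by omega⟩, ?_⟩
  rw [List.all_eq_true]
  intro hall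
  have h2 := hall ey0 hmem2
  simp [hc] at h2

lemma countP_range' : ∀ (k a M : Nat), M ≤ k →
    (List.range' a k).countP (fun t => decide (t + 1 - a ≤ M)) = M := by
  intro k
  induction k with
  | zero =>
    intro a M h
    have : M = 0 := by omega
    subst this
    simp
  | succ k ih =>
    intro a M h
    rw [List.range'_succ, List.countP_cons]
    cases M with
    | zero =>
      have hz : (List.range' (a + 1) k).countP (fun t => decide (t + 1 - a ≤ 0)) = 0 := by
        rw [List.countP_eq_zero]
        intro t ht
        have := List.mem_range'_1.mp ht
        simp only [decide_eq_true_eq]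
        omega
      rw [hz]
      simp
    | succ M' =>
      have hrest : (List.range' (a + 1) k).countP (fun t => decide (t + 1 - a ≤ M' + 1))
          = (List.range' (a + 1) k).countP (fun t => decide (t + 1 - (a + 1) ≤ M')) := by
        apply List.countP_congr
        intro t ht
        have := List.mem_range'_1.mp ht
        simp only [decide_eq_true_eq]
        omega
      rw [hrest, ih (a + 1) M' (by omega)]
      simp

lemma loopEy_count (m : List (List String)) (sx sy ex : Nat)
    (hsx : sx ≤ ex) (_hex : ex < m.length) :
    ∀ (k ey0 : Nat) (c : Int), sy ≤ ey0 → ey0 + k = m.length →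
      aLoopEy m (sx : Int) (sy : Int) (ex : Int)
          (PySem.List.pyRange (ey0 : Int) (m.length : Int)) c
        = c + ((List.range' ey0 k).countP (fun ey => clearN m sx sy ex ey) : Nat) := by
  intro k
  induction k with
  | zero =>
    intro ey0 c _ hn
    have : ey0 = m.length := by omega
    subst this
    simp [PySem.List.pyRange, aLoopEy]
  | succ k ih =>
    intro ey0 c hsy0 hn
    have h1 : ey0 < m.length := by omega
    rw [PySem.List.pyRange_one_cons (by exact_mod_cast h1)]
    simp only [aLoopEy]
    cases hc : pvCell m (ex : Int) (ey0 : Int) == "#" with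
    | true =>
      have hz : (List.range' ey0 (k + 1)).countP (fun ey => clearN m sx sy ex ey) = 0 := by
        rw [List.countP_eq_zero]
        intro ey hey
        have hmem := List.mem_range'_1.mp hey
        simp [clear_false m sx sy ex ey ey0 hsx hsy0 (by omega) hc]
      rw [hz]
      simp
    | false =>
      rw [if_neg Bool.false_ne_true]
      have hcast : (ey0 : Int) + 1 = ((ey0 + 1 : Nat) : Int) := by push_cast; ring
      rw [hcast, ih (ey0 + 1) _ (by omega) (by omega),
        clear_spec m sx sy ex ey0 (by omega) (by omega),
        List.range'_succ, List.countP_cons]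
      cases hcl : clearN m sx sy ex ey0 with
      | true =>
        rw [if_pos rfl, if_pos rfl]
        push_cast
        ring
      | false =>
        rw [if_neg Bool.false_ne_true, if_neg Bool.false_ne_true]
        push_cast
        ring

lemma buildAcc_inv (row : List String) (n : Nat) :
    ∀ (j : Nat), j ≤ n →
      bBuildAcc row ((j : Int) - 1)
          ((List.range' j (n + 1 - j)).map (fun t => ((runR row n t : Nat) : Int)))
        = (List.range' 0 (n + 1)).map (fun t => ((runR row n t : Nat) : Int)) := by
  intro j
  induction j with
  | zero =>
    intro _
    rw [bBuildAcc]
    norm_num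
  | succ j ih =>
    intro hj
    rw [bBuildAcc, dif_pos (by push_cast; omega : (0 : Int) ≤ ((j + 1 : Nat) : Int) - 1)]
    have hjn : j < n := by omega
    have hsplit : List.range' (j + 1) (n + 1 - (j + 1))
        = (j + 1) :: List.range' (j + 2) (n - j - 1) := by
      rw [show n + 1 - (j + 1) = (n - j - 1) + 1 by omega, List.range'_succ]
    have hidx : ((j + 1 : Nat) : Int) - 1 = ((j : Nat) : Int) := by push_cast; ring
    rw [hsplit, List.map_cons, hidx]
    have hhead : PySem.List.pyGetD
        (((runR row n (j + 1) : Nat) : Int)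
          :: (List.range' (j + 2) (n - j - 1)).map (fun t => ((runR row n t : Nat) : Int))) 0 0
        = ((runR row n (j + 1) : Nat) : Int) := by
      rw [PySem.List.pyGetD_ofNat']
      rfl
    rw [hhead]
    have hrun : runR row n j
        = if PySem.List.pyGetD row ((j : Nat) : Int) "" == "#" then 0
          else runR row n (j + 1) + 1 := by
      rw [runR, if_pos hjn]
    have harg : (if PySem.List.pyGetD row ((j : Nat) : Int) "" == "#" then (0 : Int)
          else ((runR row n (j + 1) : Nat) : Int) + 1)
        = ((runR row n j : Nat) : Int) := by
      rw [hrun]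
      cases hcell : PySem.List.pyGetD row ((j : Nat) : Int) "" == "#" with
      | true => simp
      | false => simp
    rw [harg]
    have hlist : ((runR row n j : Nat) : Int)
          :: ((runR row n (j + 1) : Nat) : Int)
          :: (List.range' (j + 2) (n - j - 1)).map (fun t => ((runR row n t : Nat) : Int))
        = (List.range' j (n + 1 - j)).map (fun t => ((runR row n t : Nat) : Int)) := by
      rw [show n + 1 - j = (n - j - 1) + 1 + 1 by omega, List.range'_succ, List.range'_succ]
      simp
    rw [hlist]
    exact ih (by omega)

lemma runR_len (row : List String) (n : Nat) : runR row n n = 0 := by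
  rw [runR]
  simp

lemma runsEntry (m : List (List String)) (ex sy : Nat) (hex : ex < m.length) (hsy : sy ≤ m.length) :
    PySem.List.pyGetD
        (PySem.List.pyGetD (m.map (fun row => bBuildAcc row ((m.length : Int) - 1) [0]))
          (ex : Int) [])
        (sy : Int) 0
      = ((rr m ex sy : Nat) : Int) := by
  have houter : PySem.List.pyGetD (m.map (fun row => bBuildAcc row ((m.length : Int) - 1) [0]))
      (ex : Int) [] = bBuildAcc m[ex] ((m.length : Int) - 1) [0] := by
    rw [PySem.List.pyGetD_natCast, List.getD_eq_getElem?_getD, List.getElem?_map,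
      List.getElem?_eq_getElem hex]
    rfl
  rw [houter]
  have hinit : ([0] : List Int)
      = (List.range' m.length (m.length + 1 - m.length)).map
          (fun t => ((runR m[ex] m.length t : Nat) : Int)) := by
    rw [show m.length + 1 - m.length = 1 by omega]
    simp [List.range', runR_len]
  rw [hinit, buildAcc_inv m[ex] m.length m.length le_rfl]
  rw [PySem.List.pyGetD_natCast, List.getD_eq_getElem?_getD, List.getElem?_map,
    List.getElem?_range' (by omega : sy < m.length + 1)]
  have hrow : PySem.List.pyGetD m (ex : Int) [] = m[ex] := by
    rw [PySem.List.pyGetD_natCast, List.getD_eq_getElem?_getD, List.getElem?_eq_getElem hex]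
    rfl
  unfold rr
  rw [hrow]
  simp

lemma sum_mfold_T (m : List (List String)) (sy : Nat) :
    ∀ (k e w : Nat),
      ((List.range' e k).map
          (fun ex => ((mfold m sy w (List.range' e (ex + 1 - e)) : Nat) : Int))).sum
        = ((T (fun i => rr m i sy) w k e : Nat) : Int) := by
  intro k
  induction k with
  | zero => intro e w; simp [T]
  | succ k ih =>
    intro e w
    rw [List.range'_succ, List.map_cons, List.sum_cons]
    have h1 : mfold m sy w (List.range' e (e + 1 - e)) = min w (rr m e sy) := by
      rw [show e + 1 - e = 1 by omega]
      simp [List.range', mfold]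
    have h2 : ∀ ex ∈ List.range' (e + 1) k,
        ((mfold m sy w (List.range' e (ex + 1 - e)) : Nat) : Int)
          = ((mfold m sy (min w (rr m e sy)) (List.range' (e + 1) (ex + 1 - (e + 1))) : Nat) : Int) := by
      intro ex hx
      have hb := List.mem_range'_1.mp hx
      have hr : List.range' e (ex + 1 - e) = e :: List.range' (e + 1) (ex - e) := by
        rw [show ex + 1 - e = (ex - e) + 1 by omega, List.range'_succ]
      rw [hr]
      have hm : mfold m sy w (e :: List.range' (e + 1) (ex - e))
          = mfold m sy (min w (rr m e sy)) (List.range' (e + 1) (ex - e)) := rfl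
      rw [hm, show ex - e = ex + 1 - (e + 1) by omega]
    rw [List.map_congr_left h2, ih (e + 1) (min w (rr m e sy)), h1]
    show _ = ((T (fun i => rr m i sy) w (Nat.succ k) e : Nat) : Int)
    rw [T]
    push_cast
    ring

lemma bfoldT (m : List (List String)) (sy : Nat) :
    ∀ (k e : Nat) (b t : Int) (wN : Nat), b = ((e + k : Nat) : Int) →
      ((PySem.List.pyRange (e : Int) b).foldl (fun (st : Int × Int) exI =>
          (if ((rr m exI.toNat sy : Nat) : Int) < st.1 then ((rr m exI.toNat sy : Nat) : Int)
            else st.1,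
           st.2 + if ((rr m exI.toNat sy : Nat) : Int) < st.1 then ((rr m exI.toNat sy : Nat) : Int)
            else st.1))
        (((wN : Nat) : Int), t)).2
      = t + ((T (fun i => rr m i sy) wN k e : Nat) : Int) := by
  intro k
  induction k with
  | zero =>
    intro e b t wN hb
    subst hb
    simp [PySem.List.pyRange, T]
  | succ k ih =>
    intro e b t wN hb
    subst hb
    rw [PySem.List.pyRange_one_cons (by push_cast; omega), List.foldl_cons]
    simp only [Int.toNat_natCast]
    have hmin : (if ((rr m e sy : Nat) : Int) < ((wN : Nat) : Int) then ((rr m e sy : Nat) : Int)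
          else ((wN : Nat) : Int))
        = ((min wN (rr m e sy) : Nat) : Int) := by
      by_cases h : rr m e sy < wN
      · rw [if_pos (by exact_mod_cast h), Nat.min_eq_right (le_of_lt h)]
      · rw [if_neg (by exact_mod_cast h), Nat.min_eq_left (by omega)]
    rw [hmin]
    have hcast1 : (e : Int) + 1 = ((e + 1 : Nat) : Int) := by push_cast; ring
    have hcast2 : ((e + (k + 1) : Nat) : Int) = (((e + 1) + k : Nat) : Int) := by push_cast; ring
    rw [hcast1, hcast2, ih (e + 1) _ (t + ((min wN (rr m e sy) : Nat) : Int)) (min wN (rr m e sy)) rfl]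
    show _ = t + ((T (fun i => rr m i sy) wN (Nat.succ k) e : Nat) : Int)
    rw [T]
    push_cast
    ring

lemma sum_swap (l1 l2 : List Nat) (f : Nat → Nat → Int) :
    (l1.map (fun x => (l2.map (fun y => f x y)).sum)).sum
      = (l2.map (fun y => (l1.map (fun x => f x y)).sum)).sum := by
  induction l1 with
  | nil => simp
  | cons x l1 ih =>
    simp only [List.map_cons, List.sum_cons, ih]
    rw [← PySem.List.sum_map_add_int]

lemma solveA (m : List (List String)) :
    solve m = ((List.range m.length).map (fun sx =>
      ((List.range m.length).map (fun sy => contrib m sx sy)).sum)).sum := by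
  unfold solve
  dsimp only
  have hout : ∀ (c : Int), ∀ sxI ∈ PySem.List.pyRange 0 (m.length : Int),
      ((PySem.List.pyRange 0 (m.length : Int)).foldl (fun c sy =>
        (PySem.List.pyRange sxI (m.length : Int)).foldl (fun c ex =>
          aLoopEy m sxI sy ex (PySem.List.pyRange sy (m.length : Int)) c) c) c)
      = c + gSx m sxI := by
    intro c sxI hmemx
    obtain ⟨hx1, hx2⟩ := PySem.List.mem_pyRange_one.mp hmemx
    obtain ⟨sx, rfl⟩ := Int.eq_ofNat_of_zero_le hx1
    have hsxlt : sx < m.length := by omega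
    have hmid : ∀ (c : Int), ∀ syI ∈ PySem.List.pyRange 0 (m.length : Int),
        ((PySem.List.pyRange (sx : Int) (m.length : Int)).foldl (fun c ex =>
          aLoopEy m (sx : Int) syI ex (PySem.List.pyRange syI (m.length : Int)) c) c)
        = c + gSy m sx syI := by
      intro c syI hmemy
      obtain ⟨hy1, hy2⟩ := PySem.List.mem_pyRange_one.mp hmemy
      obtain ⟨sy, rfl⟩ := Int.eq_ofNat_of_zero_le hy1
      have hsylt : sy < m.length := by omega
      have hin : ∀ (c : Int), ∀ exI ∈ PySem.List.pyRange (sx : Int) (m.length : Int),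
          aLoopEy m (sx : Int) (sy : Int) exI (PySem.List.pyRange (sy : Int) (m.length : Int)) c
            = c + gEx m sx sy exI := by
        intro c exI hmeme
        obtain ⟨he1, he2⟩ := PySem.List.mem_pyRange_one.mp hmeme
        obtain ⟨ex, rfl⟩ := Int.eq_ofNat_of_zero_le (by omega : (0 : Int) ≤ exI)
        have hexlt : ex < m.length := by omega
        have hsxex : sx ≤ ex := by omega
        rw [loopEy_count m sx sy ex hsxex hexlt (m.length - sy) sy c le_rfl (by omega)]
        unfold gEx
        rw [Int.toNat_natCast]
        congr 1
        have hcc : (List.range' sy (m.length - sy)).countP (fun ey => clearN m sx sy ex ey)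
            = (List.range' sy (m.length - sy)).countP (fun ey =>
                decide (ey + 1 - sy ≤ mfold m sy (m.length - sy) (List.range' sx (ex + 1 - sx)))) := by
          apply List.countP_congr
          intro ey hy
          have hyb := List.mem_range'_1.mp hy
          rw [clear_iff m sx sy ex ey (by omega) (by omega) (by omega) (by omega)]
        rw [hcc, countP_range' (m.length - sy) sy _ (mfold_le m sy _ _)]
      rw [PySem.List.foldl_congr_mem _ _ _ c hin, PySem.List.foldl_add]
      rw [pyRangeNat' sx m.length (le_of_lt hsxlt), List.map_map]
      have hmc : ∀ exN ∈ List.range' sx (m.length - sx),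
          (gEx m sx sy ∘ (Nat.cast : Nat → Int)) exN
            = ((mfold m sy (m.length - sy) (List.range' sx (exN + 1 - sx)) : Nat) : Int) := by
        intro exN _
        simp [gEx, Function.comp, Int.toNat_natCast]
      rw [List.map_congr_left hmc, sum_mfold_T m sy (m.length - sx) sx (m.length - sy)]
      unfold gSy contrib
      rw [Int.toNat_natCast]
    rw [PySem.List.foldl_congr_mem _ _ _ c hmid, PySem.List.foldl_add]
    rw [PySem.List.pyRange_zero_natCast, List.map_map]
    have hmc2 : ∀ sy ∈ List.range m.length,
        (gSy m sx ∘ (fun (k : Nat) => (k : Int))) sy = contrib m sx sy := by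
      intro sy _
      simp [gSy, Function.comp, Int.toNat_natCast]
    rw [List.map_congr_left hmc2]
    unfold gSx
    rw [Int.toNat_natCast]
  rw [PySem.List.foldl_congr_mem _ _ _ 0 hout, PySem.List.foldl_add]
  rw [PySem.List.pyRange_zero_natCast, List.map_map]
  have hmc3 : ∀ sx ∈ List.range m.length,
      (gSx m ∘ (fun (k : Nat) => (k : Int))) sx
        = ((List.range m.length).map (fun sy => contrib m sx sy)).sum := by
    intro sx _
    simp [gSx, Function.comp, Int.toNat_natCast]
  rw [List.map_congr_left hmc3, zero_add]

lemma solveB (m : List (List String)) :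
    solve_alt m = ((List.range m.length).map (fun sy =>
      ((List.range m.length).map (fun sx => contrib m sx sy)).sum)).sum := by
  unfold solve_alt
  dsimp only
  have hout : ∀ (t : Int), ∀ syI ∈ PySem.List.pyRange 0 (m.length : Int),
      ((PySem.List.pyRange 0 (m.length : Int)).foldl (fun t sxI =>
        ((PySem.List.pyRange sxI (m.length : Int)).foldl (fun (st : Int × Int) exI =>
            (if PySem.List.pyGetD (PySem.List.pyGetD
                  (List.map (fun row => bBuildAcc row ((m.length : Int) - 1) [0]) m) exI []) syI 0 < st.1
              then PySem.List.pyGetD (PySem.List.pyGetD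
                  (List.map (fun row => bBuildAcc row ((m.length : Int) - 1) [0]) m) exI []) syI 0
              else st.1,
             st.2 + if PySem.List.pyGetD (PySem.List.pyGetD
                  (List.map (fun row => bBuildAcc row ((m.length : Int) - 1) [0]) m) exI []) syI 0 < st.1
              then PySem.List.pyGetD (PySem.List.pyGetD
                  (List.map (fun row => bBuildAcc row ((m.length : Int) - 1) [0]) m) exI []) syI 0
              else st.1))
          ((m.length : Int) - syI, t)).2) t)
      = t + gSyB m syI := by
    intro t syI hmemy
    obtain ⟨hy1, hy2⟩ := PySem.List.mem_pyRange_one.mp hmemy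
    obtain ⟨sy, rfl⟩ := Int.eq_ofNat_of_zero_le hy1
    have hsylt : sy < m.length := by omega
    have hmid : ∀ (t : Int), ∀ sxI ∈ PySem.List.pyRange 0 (m.length : Int),
        ((PySem.List.pyRange sxI (m.length : Int)).foldl (fun (st : Int × Int) exI =>
            (if PySem.List.pyGetD (PySem.List.pyGetD
                  (List.map (fun row => bBuildAcc row ((m.length : Int) - 1) [0]) m) exI []) (sy : Int) 0 < st.1
              then PySem.List.pyGetD (PySem.List.pyGetD
                  (List.map (fun row => bBuildAcc row ((m.length : Int) - 1) [0]) m) exI []) (sy : Int) 0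
              else st.1,
             st.2 + if PySem.List.pyGetD (PySem.List.pyGetD
                  (List.map (fun row => bBuildAcc row ((m.length : Int) - 1) [0]) m) exI []) (sy : Int) 0 < st.1
              then PySem.List.pyGetD (PySem.List.pyGetD
                  (List.map (fun row => bBuildAcc row ((m.length : Int) - 1) [0]) m) exI []) (sy : Int) 0
              else st.1))
          ((m.length : Int) - (sy : Int), t)).2
        = t + gSxB m sy sxI := by
      intro t sxI hmemx
      obtain ⟨hx1, hx2⟩ := PySem.List.mem_pyRange_one.mp hmemx
      obtain ⟨sx, rfl⟩ := Int.eq_ofNat_of_zero_le hx1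
      have hsxlt : sx < m.length := by omega
      have hstep : ∀ (st : Int × Int), ∀ exI ∈ PySem.List.pyRange (sx : Int) (m.length : Int),
          ((if PySem.List.pyGetD (PySem.List.pyGetD
                (List.map (fun row => bBuildAcc row ((m.length : Int) - 1) [0]) m) exI []) (sy : Int) 0 < st.1
            then PySem.List.pyGetD (PySem.List.pyGetD
                (List.map (fun row => bBuildAcc row ((m.length : Int) - 1) [0]) m) exI []) (sy : Int) 0
            else st.1,
           st.2 + if PySem.List.pyGetD (PySem.List.pyGetD
                (List.map (fun row => bBuildAcc row ((m.length : Int) - 1) [0]) m) exI []) (sy : Int) 0 < st.1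
            then PySem.List.pyGetD (PySem.List.pyGetD
                (List.map (fun row => bBuildAcc row ((m.length : Int) - 1) [0]) m) exI []) (sy : Int) 0
            else st.1) : Int × Int)
          = (if ((rr m exI.toNat sy : Nat) : Int) < st.1 then ((rr m exI.toNat sy : Nat) : Int)
              else st.1,
             st.2 + if ((rr m exI.toNat sy : Nat) : Int) < st.1 then ((rr m exI.toNat sy : Nat) : Int)
              else st.1) := by
        intro st exI hmeme
        obtain ⟨he1, he2⟩ := PySem.List.mem_pyRange_one.mp hmeme
        obtain ⟨ex, rfl⟩ := Int.eq_ofNat_of_zero_le (by omega : (0 : Int) ≤ exI)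
        have hexlt : ex < m.length := by omega
        rw [show (List.map (fun row => bBuildAcc row ((m.length : Int) - 1) [0]) m)
            = m.map (fun row => bBuildAcc row ((m.length : Int) - 1) [0]) from rfl]
        rw [runsEntry m ex sy hexlt (by omega), Int.toNat_natCast]
      rw [PySem.List.foldl_congr_mem _ _ _ _ hstep]
      rw [show (m.length : Int) - (sy : Int) = (((m.length - sy : Nat)) : Int) by push_cast; omega]
      rw [bfoldT m sy (m.length - sx) sx ((m.length : Int)) t (m.length - sy) (by omega)]
      unfold gSxB contrib
      rw [Int.toNat_natCast]
    rw [PySem.List.foldl_congr_mem _ _ _ t hmid, PySem.List.foldl_add]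
    rw [PySem.List.pyRange_zero_natCast, List.map_map]
    have hmc2 : ∀ sx ∈ List.range m.length,
        (gSxB m sy ∘ (fun (k : Nat) => (k : Int))) sx = contrib m sx sy := by
      intro sx _
      simp [gSxB, Function.comp, Int.toNat_natCast]
    rw [List.map_congr_left hmc2]
    unfold gSyB
    rw [Int.toNat_natCast]
  rw [PySem.List.foldl_congr_mem _ _ _ 0 hout, PySem.List.foldl_add]
  rw [PySem.List.pyRange_zero_natCast, List.map_map]
  have hmc3 : ∀ sy ∈ List.range m.length,
      (gSyB m ∘ (fun (k : Nat) => (k : Int))) sy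
        = ((List.range m.length).map (fun sx => contrib m sx sy)).sum := by
    intro sy _
    simp [gSyB, Function.comp, Int.toNat_natCast]
  rw [List.map_congr_left hmc3, zero_add]

-- ===== VERDICT (by name: the statement is the Claim_ definition above) =====
theorem solve_spec : Claim_equal_solve := by
  intro m _hDom _hPre
  unfold Spec_solve
  rw [solveA, solveB, sum_swap]
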